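-- pv_equiv track=rewrite | github.com/Nagavenkatasai7/EVRERY-DAY-ASSISTANT | src/social_media/content_generator.py | _get_humanization_tips
-- ===== SOURCE A (Python) =====
-- from typing import Dict, List, Optional
--
-- def _get_humanization_tips(issues: List[str]) -> List[str]:
--     """Get specific tips to humanize content based on issues found"""
--     tips = []
--
--     if any("AI phrase" in issue for issue in issues):
--         tips.append("Replace opening with a specific observation or challenge")
--
--     if any("emoji" in issue for issue in issues):
--         tips.append("Remove most emojis, keep max 1-2 total")
--
--     if any("parallel" in issue for issue in issues):
--         tips.append("Vary bullet point lengths and structures")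
--
--     if any("generic" in issue for issue in issues):
--         tips.append("Replace generic terms with specific metrics or examples")
--
--     if any("contractions" in issue for issue in issues):
--         tips.append("Add contractions: it's, I'm, don't, etc.")
--
--     tips.append("Add one detail only you would know")
--     tips.append("Include a casual phrase: 'turns out', 'here's the thing'")
--
--     return tips
-- ===== SOURCE B (Python) =====
-- from typing import List
--
-- def _get_humanization_tips(issues: List[str]) -> List[str]:
--     """Single pass over issues collecting keyword flags, then flag-driven tip emission."""
--     ai = emoji = parallel = generic = contractions = False
--     for issue in issues:
--         ai = ai or "AI phrase" in issue
--         emoji = emoji or "emoji" in issue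
--         parallel = parallel or "parallel" in issue
--         generic = generic or "generic" in issue
--         contractions = contractions or "contractions" in issue
--
--     flagged = [
--         (ai, "Replace opening with a specific observation or challenge"),
--         (emoji, "Remove most emojis, keep max 1-2 total"),
--         (parallel, "Vary bullet point lengths and structures"),
--         (generic, "Replace generic terms with specific metrics or examples"),
--         (contractions, "Add contractions: it's, I'm, don't, etc."),
--     ]
--     tips = [tip for flag, tip in flagged if flag]
--     tips.append("Add one detail only you would know")
--     tips.append("Include a casual phrase: 'turns out', 'here's the thing'")
--     return tips
-- ===== Notes on version B (the rewrite author's own statement) =====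
-- stated objective: faster
-- what changed: Replaces five separate any() scans over issues with one accumulating pass computing five boolean flags, then a flag-driven emission from a (flag, tip) table.
import Mathlib
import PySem

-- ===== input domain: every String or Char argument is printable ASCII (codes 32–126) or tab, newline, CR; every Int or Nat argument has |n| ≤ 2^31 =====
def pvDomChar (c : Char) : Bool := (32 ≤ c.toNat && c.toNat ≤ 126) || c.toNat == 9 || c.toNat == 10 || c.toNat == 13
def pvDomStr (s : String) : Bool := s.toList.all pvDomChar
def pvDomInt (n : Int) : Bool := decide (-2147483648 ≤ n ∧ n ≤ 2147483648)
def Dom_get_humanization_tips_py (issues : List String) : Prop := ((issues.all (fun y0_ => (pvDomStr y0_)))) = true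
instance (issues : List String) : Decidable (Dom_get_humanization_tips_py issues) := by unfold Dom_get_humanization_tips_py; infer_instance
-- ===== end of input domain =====

-- B replaces A's five any() scans over `issues` with one accumulating pass plus a flag-driven emission table (alternative decomposition, same cost class).

-- ===== PORT A =====
def get_humanization_tips_py (issues : List String) : List String :=
  let tips : List String := []
  let tips := if issues.any (fun issue => PySem.Str.isIn "AI phrase" issue) then
      tips ++ ["Replace opening with a specific observation or challenge"] else tips
  let tips := if issues.any (fun issue => PySem.Str.isIn "emoji" issue) then
      tips ++ ["Remove most emojis, keep max 1-2 total"] else tips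
  let tips := if issues.any (fun issue => PySem.Str.isIn "parallel" issue) then
      tips ++ ["Vary bullet point lengths and structures"] else tips
  let tips := if issues.any (fun issue => PySem.Str.isIn "generic" issue) then
      tips ++ ["Replace generic terms with specific metrics or examples"] else tips
  let tips := if issues.any (fun issue => PySem.Str.isIn "contractions" issue) then
      tips ++ ["Add contractions: it's, I'm, don't, etc."] else tips
  let tips := tips ++ ["Add one detail only you would know"]
  let tips := tips ++ ["Include a casual phrase: 'turns out', 'here's the thing'"]
  tips

-- ===== PORT B =====
def get_humanization_tips_py_alt (issues : List String) : List String :=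
  let flags := issues.foldl
    (fun (st : Bool × Bool × Bool × Bool × Bool) issue =>
      (st.1 || PySem.Str.isIn "AI phrase" issue,
       st.2.1 || PySem.Str.isIn "emoji" issue,
       st.2.2.1 || PySem.Str.isIn "parallel" issue,
       st.2.2.2.1 || PySem.Str.isIn "generic" issue,
       st.2.2.2.2 || PySem.Str.isIn "contractions" issue))
    (false, false, false, false, false)
  let flagged : List (Bool × String) :=
    [(flags.1, "Replace opening with a specific observation or challenge"),
     (flags.2.1, "Remove most emojis, keep max 1-2 total"),
     (flags.2.2.1, "Vary bullet point lengths and structures"),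
     (flags.2.2.2.1, "Replace generic terms with specific metrics or examples"),
     (flags.2.2.2.2, "Add contractions: it's, I'm, don't, etc.")]
  let tips := (flagged.filter (fun p => p.1)).map (fun p => p.2)
  let tips := tips ++ ["Add one detail only you would know"]
  let tips := tips ++ ["Include a casual phrase: 'turns out', 'here's the thing'"]
  tips

-- ===== PRECONDITION & SPEC =====
def Spec_get_humanization_tips_py (issues : List String) (out : List String) : Prop := out = get_humanization_tips_py_alt issues
instance (issues : List String) (out : List String) : Decidable (Spec_get_humanization_tips_py issues out) := by unfold Spec_get_humanization_tips_py; infer_instance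

-- ===== CLAIM (what is proved, stated in full; the proofs are below) =====
def Claim_equal_get_humanization_tips_py : Prop := ∀ (issues : List String), Dom_get_humanization_tips_py issues → Spec_get_humanization_tips_py issues (get_humanization_tips_py issues)

-- ===== LEMMAS AND PROOFS =====

-- the fold's five components each compute the corresponding any()
theorem flags_eq (issues : List String) (a b c d e : Bool) :
    issues.foldl
      (fun (st : Bool × Bool × Bool × Bool × Bool) issue =>
        (st.1 || PySem.Str.isIn "AI phrase" issue,
         st.2.1 || PySem.Str.isIn "emoji" issue,
         st.2.2.1 || PySem.Str.isIn "parallel" issue,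
         st.2.2.2.1 || PySem.Str.isIn "generic" issue,
         st.2.2.2.2 || PySem.Str.isIn "contractions" issue))
      (a, b, c, d, e)
    = (a || issues.any (fun i => PySem.Str.isIn "AI phrase" i),
       b || issues.any (fun i => PySem.Str.isIn "emoji" i),
       c || issues.any (fun i => PySem.Str.isIn "parallel" i),
       d || issues.any (fun i => PySem.Str.isIn "generic" i),
       e || issues.any (fun i => PySem.Str.isIn "contractions" i)) := by
  induction issues generalizing a b c d e with
  | nil => simp
  | cons h t ih => rw [List.foldl_cons, ih]; simp [Bool.or_assoc]

-- ===== VERDICT (by name: the statement is the Claim_ definition above) =====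
theorem get_humanization_tips_py_spec : Claim_equal_get_humanization_tips_py := by
  intro issues _
  unfold Spec_get_humanization_tips_py get_humanization_tips_py get_humanization_tips_py_alt
  simp only [flags_eq, Bool.false_or]
  by_cases h1 : issues.any (fun i => PySem.Str.isIn "AI phrase" i) <;>
  by_cases h2 : issues.any (fun i => PySem.Str.isIn "emoji" i) <;>
  by_cases h3 : issues.any (fun i => PySem.Str.isIn "parallel" i) <;>
  by_cases h4 : issues.any (fun i => PySem.Str.isIn "generic" i) <;>
  by_cases h5 : issues.any (fun i => PySem.Str.isIn "contractions" i) <;>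
  all_goals simp only [h1, h2, h3, h4, h5]; simp [h1, h2, h3, h4, h5]
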